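-- pv_equiv track=rewrite | github.com/joaoavf/connect-x | kaggle/iebot_v1_1_submission.py | get_column_summary
-- ===== SOURCE A (Python) =====
-- def get_column_summary(column):
--     """Analyses the status of a given vertical column.
--
--     Parameters:
--     column (List): Column of a Connect4 Game mapped by (0: Empty, 1: Player 1, 2: Player 2)
--
--     Returns:
--     Tuple(count (int)       : count of top_piece sequence,
--           free_spaces (int) : number of free cell slots in that column)"""
--
--     count, top_piece, free_spaces = 0, 0, 0
--
--     for cell_value in column:
--         if cell_value > 0:  # Cell is not empty
--             if count == 0:
--                 top_piece = cell_value
--             if cell_value == top_piece: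
--                 count += 1
--             else:
--                 break
--         else:
--             free_spaces += 1
--
--     return count, free_spaces
-- ===== SOURCE B (Python) =====
-- def get_column_summary(column):
--     top_piece = next((c for c in column if c > 0), 0)
--     stop = next((i for i, c in enumerate(column) if c > 0 and c != top_piece),
--                 len(column))
--     prefix = column[:stop]
--     count = sum(1 for c in prefix if c > 0)
--     return count, stop - count
-- ===== Notes on version B (the rewrite author's own statement) =====
-- stated objective: alternative
-- what changed: Replaces A's single stateful loop (mutable count/top_piece/free_spaces with an in-loop break) by a find-then-measure decomposition: first locate the top piece, then locate the first conflicting positive cell, and compute both counts from the resulting prefix.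
import Mathlib
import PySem

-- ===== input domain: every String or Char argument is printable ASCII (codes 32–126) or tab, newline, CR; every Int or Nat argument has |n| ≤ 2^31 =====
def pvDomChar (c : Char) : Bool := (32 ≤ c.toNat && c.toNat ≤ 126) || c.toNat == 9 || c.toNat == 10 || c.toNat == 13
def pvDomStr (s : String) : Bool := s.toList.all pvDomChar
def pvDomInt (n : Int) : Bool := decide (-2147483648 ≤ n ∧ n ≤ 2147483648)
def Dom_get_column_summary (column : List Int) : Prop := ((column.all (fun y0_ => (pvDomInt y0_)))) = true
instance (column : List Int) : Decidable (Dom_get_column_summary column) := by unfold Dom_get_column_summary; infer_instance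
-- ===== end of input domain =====

-- B replaces A's single stateful loop by a find-then-measure decomposition (same cost, alternative structure).
-- ===== PORT A =====
-- loop of A: state (count, top_piece, free_spaces); 'break' returns immediately
def goA : List Int → Int → Int → Int → Int × Int
  | [], count, _top, free => (count, free)
  | c :: rest, count, top, free =>
    if 0 < c then
      let top' := if count = 0 then c else top
      if c = top' then goA rest (count + 1) top' free
      else (count, free)
    else goA rest count top (free + 1)

def get_column_summary (column : List Int) : Int × Int :=
  goA column 0 0 0

-- ===== PORT B =====
-- next((c for c in column if c > 0), 0)
def firstPos : List Int → Option Int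
  | [] => none
  | c :: rest => if 0 < c then some c else firstPos rest

-- next((i for i, c in enumerate(column) if c > 0 and c != top), len(column))
def stopIdx : List Int → Int → Nat
  | [], _ => 0
  | c :: rest, t => if 0 < c ∧ c ≠ t then 0 else stopIdx rest t + 1

def get_column_summary_alt (column : List Int) : Int × Int :=
  let top := (firstPos column).getD 0
  let stop := stopIdx column top
  let pre := column.take stop      -- column[:stop], 0 ≤ stop ≤ len(column)
  let count : Int := ((pre.filter (fun c => decide (0 < c))).length : Int)
  (count, (stop : Int) - count)

-- ===== PRECONDITION & SPEC =====
def Spec_get_column_summary (column : List Int) (out : Int × Int) : Prop := out = get_column_summary_alt column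
instance (column : List Int) (out : Int × Int) : Decidable (Spec_get_column_summary column out) := by unfold Spec_get_column_summary; infer_instance

-- ===== CLAIM (what is proved, stated in full; the proofs are below) =====
def Claim_equal_get_column_summary : Prop := ∀ (column : List Int), Dom_get_column_summary column → Spec_get_column_summary column (get_column_summary column)

-- ===== LEMMAS AND PROOFS =====

def cntPos (l : List Int) (t : Int) : Nat :=
  ((l.take (stopIdx l t)).filter (fun c => decide (0 < c))).length

-- once a run has started (count ≥ 1), top_piece is frozen and the loop just
-- measures the prefix up to the first conflicting positive cell
lemma goA_run (l : List Int) : ∀ (k t f : Int), 1 ≤ k →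
    goA l k t f = (k + (cntPos l t : Int), f + ((stopIdx l t : Int) - (cntPos l t : Int))) := by
  induction l with
  | nil => intro k t f _; simp [goA, cntPos, stopIdx]
  | cons c rest ih =>
    intro k t f hk
    by_cases hc : 0 < c
    · have hk0 : ¬ k = 0 := by omega
      by_cases ht : c = t
      · subst ht
        have := ih (k + 1) c f (by omega)
        simp [goA, hc, hk0, cntPos, stopIdx, this]
        push_cast
        omega
      · simp [goA, hc, hk0, ht, cntPos, stopIdx]
    · have := ih k t (f + 1) hk
      simp [goA, hc, cntPos, stopIdx, this]
      push_cast
      omega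

-- before any piece has been seen, only free_spaces accumulates
lemma goA_main (l : List Int) : ∀ (f : Int),
    goA l 0 0 f = ((get_column_summary_alt l).1, f + (get_column_summary_alt l).2) := by
  induction l with
  | nil => intro f; simp [goA, get_column_summary_alt, firstPos, stopIdx]
  | cons c rest ih =>
    intro f
    by_cases hc : 0 < c
    · have hcc : ¬ (0 < c ∧ c ≠ c) := by simp
      have := goA_run rest 1 c f (by omega)
      simp [goA, hc, get_column_summary_alt, firstPos, stopIdx, hcc, this, cntPos]
      push_cast
      omega
    · have := ih (f + 1)
      have hcp : ¬ (0 < c ∧ c ≠ (firstPos rest).getD 0) := by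
        intro h; exact hc h.1
      simp [goA, hc, get_column_summary_alt, firstPos, stopIdx, hcp, this]
      push_cast
      omega

-- ===== VERDICT (by name: the statement is the Claim_ definition above) =====
theorem get_column_summary_spec : Claim_equal_get_column_summary := by
  intro column _
  unfold Spec_get_column_summary get_column_summary
  have := goA_main column 0
  simpa using this
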